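-- pv_equiv track=rewrite | github.com/dongrixinyu/JioNLP | jionlp/gadget/time_parser_new/time_utility.py | _compare_handler
-- ===== SOURCE A (Python) =====
-- def _compare_handler(first_handler, second_handler):
--     """ 比较两个 handler 的时间先后
--
--     Args:
--         first_handler: 第一个 handler
--         second_handler: 第二个 handler
--
--     Returns:
--         若第一个时间和第二个时间相同，返回 0
--         若第一个时间早于第二个时间，返回 -1
--         若第一个时间晚于第二个时间，返回 1
--     """
--     for f, s in zip(first_handler, second_handler):
--         if f == -1 or s == -1:
--             break
--         if f == s:
--             continue
--         elif f > s:
--             return 1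
--         elif f < s:
--             return -1
--
--     return 0
-- ===== SOURCE B (Python) =====
-- def _compare_handler(first_handler, second_handler):
--     # Build the comparable prefixes: stop at the first pair containing -1,
--     # then decide by one built-in lexicographic tuple comparison.
--     pairs = []
--     for f, s in zip(first_handler, second_handler):
--         if f == -1 or s == -1:
--             break
--         pairs.append((f, s))
--     p1 = tuple(f for f, _ in pairs)
--     p2 = tuple(s for _, s in pairs)
--     return (p1 > p2) - (p1 < p2)
-- ===== Notes on version B (the rewrite author's own statement) =====
-- stated objective: alternative
-- what changed: Replaces the compare-and-early-return loop by extracting the -1-truncated prefixes and deciding with a single built-in lexicographic tuple comparison (p1 > p2) - (p1 < p2).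
import Mathlib
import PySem

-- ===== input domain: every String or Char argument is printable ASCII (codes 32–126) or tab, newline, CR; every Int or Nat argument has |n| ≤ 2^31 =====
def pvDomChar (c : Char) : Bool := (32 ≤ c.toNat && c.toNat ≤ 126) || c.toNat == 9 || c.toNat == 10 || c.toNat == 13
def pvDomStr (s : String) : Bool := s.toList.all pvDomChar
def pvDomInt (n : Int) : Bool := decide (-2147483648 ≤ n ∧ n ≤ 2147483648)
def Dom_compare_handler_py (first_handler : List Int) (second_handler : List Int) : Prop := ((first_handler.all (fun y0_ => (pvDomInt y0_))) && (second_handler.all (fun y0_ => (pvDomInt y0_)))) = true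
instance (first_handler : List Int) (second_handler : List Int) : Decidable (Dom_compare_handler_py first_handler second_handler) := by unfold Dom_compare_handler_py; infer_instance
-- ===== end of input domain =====

-- B replaces the manual compare loop by "-1-truncated prefixes, then one lexicographic comparison" (alternative decomposition, same cost).


-- ===== PORT A =====
-- compare-and-early-return loop over zip, ported as structural recursion
def compareGo : List (Int × Int) → Int
  | [] => 0
  | (f, s) :: rest =>
    if f = -1 ∨ s = -1 then 0
    else if f = s then compareGo rest
    else if f > s then 1
    else (-1)

def compare_handler_py (first_handler : List Int) (second_handler : List Int) : Int :=
  compareGo (first_handler.zip second_handler)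

-- ===== PORT B =====
-- pairs-prefix up to the first pair containing -1 (the loop with break in Source B)
def takePairs : List (Int × Int) → List (Int × Int)
  | [] => []
  | (f, s) :: rest => if f = -1 ∨ s = -1 then [] else (f, s) :: takePairs rest

-- Python tuple lexicographic comparison as an Ordering (p1 < p2 / p1 > p2)
def tupCmp : List Int → List Int → Ordering
  | [], [] => .eq
  | [], _ :: _ => .lt
  | _ :: _, [] => .gt
  | x :: xs, y :: ys => if x < y then .lt else if x > y then .gt else tupCmp xs ys

def compare_handler_py_alt (first_handler : List Int) (second_handler : List Int) : Int :=
  let pairs := takePairs (first_handler.zip second_handler)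
  let c := tupCmp (pairs.map Prod.fst) (pairs.map Prod.snd)
  (if c = .gt then 1 else 0) - (if c = .lt then 1 else 0)

-- ===== PRECONDITION & SPEC =====
def Spec_compare_handler_py (first_handler : List Int) (second_handler : List Int) (out : Int) : Prop := out = compare_handler_py_alt first_handler second_handler
instance (first_handler : List Int) (second_handler : List Int) (out : Int) : Decidable (Spec_compare_handler_py first_handler second_handler out) := by unfold Spec_compare_handler_py; infer_instance

-- ===== CLAIM (what is proved, stated in full; the proofs are below) =====
def Claim_equal_compare_handler_py : Prop := ∀ (first_handler : List Int) (second_handler : List Int), Dom_compare_handler_py first_handler second_handler → Spec_compare_handler_py first_handler second_handler (compare_handler_py first_handler second_handler)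

-- ===== LEMMAS AND PROOFS =====
lemma go_eq_alt (l : List (Int × Int)) :
    compareGo l =
      (let pairs := takePairs l
       let c := tupCmp (pairs.map Prod.fst) (pairs.map Prod.snd)
       (if c = .gt then 1 else 0) - (if c = .lt then 1 else 0)) := by
  induction l with
  | nil => simp [compareGo, takePairs, tupCmp]
  | cons p rest ih =>
    obtain ⟨f, s⟩ := p
    by_cases h1 : f = -1 ∨ s = -1
    · simp [compareGo, takePairs, tupCmp, h1]
    · obtain ⟨hf, hs⟩ := not_or.mp h1
      by_cases h2 : f = s
      · simpa [compareGo, takePairs, tupCmp, hf, hs, h2] using ih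
      · by_cases h3 : f > s
        · simp [compareGo, takePairs, tupCmp, hf, hs, h2, h3, not_lt_of_gt h3]
        · have hlt : f < s := lt_of_le_of_ne (not_lt.mp h3) h2
          simp [compareGo, takePairs, tupCmp, hf, hs, h2, h3, hlt]

-- ===== VERDICT (by name: the statement is the Claim_ definition above) =====
theorem compare_handler_py_spec : Claim_equal_compare_handler_py := by
  intro a b _
  show compare_handler_py a b = compare_handler_py_alt a b
  simpa [compare_handler_py, compare_handler_py_alt] using go_eq_alt (a.zip b)
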